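-- pv_equiv track=rewrite | github.com/sumin123/CodingTest | 0911/SEYEONG/LINE/2.py | solution
-- ===== SOURCE A (Python) =====
-- from collections import Counter, defaultdict
--
-- def solution(research, n, k):
--     answer = ''
--
--     # 키워드 별로 day count 정리
--     day_count = defaultdict(list)
--
--     # 이슈 검색어 목록
--     best_issue = []
--
--
--
--     # n일 동안 합계가 이 기준 이상이어야 함
--     criteria = 2*n*k
--
--     for day_keyword in research:
--
--         cur_cnt = Counter(day_keyword)
--
--         for key, cnt in cur_cnt.items():
--
--             day_count[key].append(cnt)
--
--
--
--     for key in day_count: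
--         if len(day_count[key]) < n:
--             continue
--
--         # 연속 k번 이상 등장한 횟수
--         cont = 0
--
--         for day, count in enumerate(day_count[key]):
--
--             if count >= k:
--                 cont += 1
--             else:
--                 cont = 0
--
--             if cont == n:
--                 if sum(day_count[key][day-n+1:day+1]) >= criteria:
--                     best_issue.append(key)
--                     cont = 1
--
--     if best_issue:
--         result = Counter(best_issue).most_common()
--         # 선정 횟수 -> 사전 순 정렬
--         result = sorted(result, key=lambda x:[-x[1], x[0]])
--         answer = result[0][0]
--     else:
--         return "None"
--
--     return answer
-- ===== SOURCE B (Python) =====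
-- def solution(research, n, k):
--     criteria = 2 * n * k
--
--     # per-keyword sequence of per-day appearance counts
--     seqs = {}
--     for day_keyword in research:
--         cnt = {}
--         for w in day_keyword:
--             cnt[w] = cnt.get(w, 0) + 1
--         for key, c in cnt.items():
--             seqs.setdefault(key, []).append(c)
--
--     def runs(counts):
--         # maximal segments of consecutive counts >= k
--         out, cur = [], []
--         for c in counts:
--             if c >= k:
--                 cur.append(c)
--             else:
--                 if cur:
--                     out.append(cur)
--                 cur = []
--         if cur:
--             out.append(cur)
--         return out
--
--     def walk(run):
--         # selections inside one run: prefix sums, a check at offset n-1,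
--         # then jumps of n-1 after each success; a failed check ends the run
--         pref = [0]
--         s = 0
--         for c in run:
--             s += c
--             pref.append(s)
--         hits = 0
--         pos = n - 1
--         while 0 <= pos < len(run) and pref[pos + 1] - pref[pos + 1 - n] >= criteria:
--             hits += 1
--             if n == 1:
--                 break
--             pos += n - 1
--         return hits
--
--     best = None  # (key, number of selections)
--     for key, counts in seqs.items():
--         h = sum(walk(r) for r in runs(counts))
--         if h and (best is None or h > best[1] or (h == best[1] and key < best[0])):
--             best = (key, h)
--     return best[0] if best else "None"
-- ===== Notes on version B (the rewrite author's own statement) =====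
-- stated objective: alternative
-- what changed: Instead of A's per-element cont-counter scan with re-sliced window sums and a Counter + double sort, B splits each keyword's count sequence into maximal runs of counts >= k, walks each run over its prefix-sum array in jumps of n-1 (a failed check ends the run, matching A's cont semantics), and picks the winner in one min-tracking pass.
-- outside the precondition, e.g. on solution([['a']], 0, 2): A returns 'a', B returns 'None'
import Mathlib
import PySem

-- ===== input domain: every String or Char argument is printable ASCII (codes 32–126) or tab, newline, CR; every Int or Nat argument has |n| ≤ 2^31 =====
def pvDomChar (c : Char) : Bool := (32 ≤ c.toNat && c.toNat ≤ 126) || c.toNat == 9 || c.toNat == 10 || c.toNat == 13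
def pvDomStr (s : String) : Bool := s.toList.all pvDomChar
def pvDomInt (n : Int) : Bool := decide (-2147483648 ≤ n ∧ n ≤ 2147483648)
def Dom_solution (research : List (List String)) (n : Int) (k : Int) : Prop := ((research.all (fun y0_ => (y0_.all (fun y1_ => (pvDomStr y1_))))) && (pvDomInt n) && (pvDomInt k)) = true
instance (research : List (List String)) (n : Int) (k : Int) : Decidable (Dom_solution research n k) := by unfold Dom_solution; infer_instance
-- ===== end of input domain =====

-- B replaces A's per-element cont-counter scan (re-sliced window sums, Counter + double
-- sort) by splitting each keyword's count sequence into maximal runs of counts >= k,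
-- walking each run over its prefix sums in jumps of n-1, and one min-tracking pass (alternative).


-- ===== PORT A =====
-- day_count: for each day, Counter the day's keywords, append each count to day_count[key]
def dayCountA (research : List (List String)) : PySem.Dict String (List Int) :=
  research.foldl (fun d day_keyword =>
    (PySem.Dict.counter day_keyword).items.foldl
      (fun d p => d.modify p.1 [] (· ++ [p.2])) d) PySem.Dict.empty

-- the inner 'for day, count in enumerate(day_count[key])' loop, state (cont, best_issue)
def innerA (cs : List Int) (n k criteria : Int) (key : String) (best : List String) :
    Int × List String :=
  (PySem.List.enumerate cs 0).foldl (fun st dc =>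
    let cont := if dc.2 ≥ k then st.1 + 1 else 0
    if cont = n then
      if (PySem.List.slice cs (some (dc.1 - n + 1)) (some (dc.1 + 1))).sum ≥ criteria then
        (1, st.2 ++ [key])
      else (cont, st.2)
    else (cont, st.2)) (0, best)

def solution (research : List (List String)) (n : Int) (k : Int) : String :=
  let criteria := 2 * n * k
  let day_count := dayCountA research
  let best_issue := day_count.keys.foldl (fun best key =>
    if ((day_count.getD key []).length : Int) < n then best
    else (innerA (day_count.getD key []) n k criteria key best).2) []
  if best_issue ≠ [] then
    -- most_common = stable sort by count, descending; then sort by [-count, key]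
    (((PySem.List.sorted2
        (PySem.List.sorted (PySem.Dict.counter best_issue).items (fun p => p.2) true)
        (fun p => -p.2) (fun p => p.1) false)).headD ("", 0)).1
  else "None"

-- ===== PORT B =====
-- seqs: same grouping pass, built with plain dict get / setdefault
def dayCountB (research : List (List String)) : PySem.Dict String (List Int) :=
  research.foldl (fun d day_keyword =>
    ((day_keyword.foldl (fun s w => s.insert w (s.getD w 0 + 1)) PySem.Dict.empty)).items.foldl
      (fun d p => d.modify p.1 [] (· ++ [p.2])) d) PySem.Dict.empty

-- runs(counts): maximal segments of consecutive counts >= k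
def runsB (k : Int) (counts : List Int) : List (List Int) :=
  let p := counts.foldl (fun (st : List (List Int) × List Int) c =>
    if c ≥ k then (st.1, st.2 ++ [c])
    else ((if st.2 ≠ [] then st.1 ++ [st.2] else st.1), ([] : List Int))) ([], [])
  if p.2 ≠ [] then p.1 ++ [p.2] else p.1

-- pref = [0]; s = 0; for c in run: s += c; pref.append(s)
def prefB (run : List Int) : List Int :=
  (run.foldl (fun (st : List Int × Int) c => (st.1 ++ [st.2 + c], st.2 + c)) ([(0:Int)], 0)).1

-- the while loop of walk(run); fuel = run.length bounds its iterations (pos advances by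
-- n-1 ≥ 1 each time for n ≥ 2, n = 1 breaks after one, n ≤ 0 fails the 0 ≤ pos test).
-- pref[pos+1] / pref[pos+1-n]: both indices are in range whenever the tested bounds hold,
-- exactly as in Python (short-circuit), so .getD 0 is never the value used.
def walkAux (n criteria len : Int) (pref : List Int) : Nat → Int → Int → Int
  | 0, _, hits => hits
  | f+1, pos, hits =>
    if 0 ≤ pos ∧ pos < len ∧
        (PySem.List.pyGet? pref (pos+1)).getD 0 - (PySem.List.pyGet? pref (pos+1-n)).getD 0
          ≥ criteria then
      if n = 1 then hits + 1
      else walkAux n criteria len pref f (pos + (n - 1)) (hits + 1)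
    else hits

def walkB (n criteria : Int) (run : List Int) : Int :=
  walkAux n criteria (run.length : Int) (prefB run) run.length (n - 1) 0

-- h = sum(walk(r) for r in runs(counts))
def hitsB (n k criteria : Int) (counts : List Int) : Int :=
  (runsB k counts).foldl (fun s r => s + walkB n criteria r) 0

def solution_alt (research : List (List String)) (n : Int) (k : Int) : String :=
  let criteria := 2 * n * k
  let best := (dayCountB research).items.foldl
    (fun (best : Option (String × Int)) kc =>
      let h := hitsB n k criteria kc.2
      match best with
      | none => if h ≠ 0 then some (kc.1, h) else none
      | some b => if h ≠ 0 ∧ (h > b.2 ∨ (h = b.2 ∧ kc.1 < b.1)) then some (kc.1, h)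
                  else some b) none
  match best with
  | some b => b.1
  | none => "None"

-- ===== PRECONDITION & SPEC =====
-- Pre_ excludes n = 0 (A still returns there): with n = 0 A's 'cont == n' trigger fires on
-- an EMPTY window, selecting keywords on days they appear FEWER than k times — an accident
-- of the implementation; B naturally finds no size-0 streak and returns "None" there.
def Pre_solution (research : List (List String)) (n : Int) (k : Int) : Prop := n ≠ 0
instance (research : List (List String)) (n : Int) (k : Int) : Decidable (Pre_solution research n k) := by unfold Pre_solution; infer_instance
def pvWitness_solution : List (List String) × Int × Int := ([["a", "a"]], 1, 1)

def Spec_solution (research : List (List String)) (n : Int) (k : Int) (out : String) : Prop := out = solution_alt research n k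
instance (research : List (List String)) (n : Int) (k : Int) (out : String) : Decidable (Spec_solution research n k out) := by unfold Spec_solution; infer_instance

-- ===== CLAIM (what is proved, stated in full; the proofs are below) =====
def Claim_equal_solution : Prop := ∀ (research : List (List String)) (n : Int) (k : Int), Dom_solution research n k → Pre_solution research n k → Spec_solution research n k (solution research n k)

-- ===== LEMMAS AND PROOFS =====

-- ---- proof-side definitions ----

-- A's inner-loop step function (innerA is literally a foldl of this)
def stepA (cs : List Int) (n k criteria : Int) (key : String) (st : Int × List String)
    (dc : Int × Int) : Int × List String :=
  let cont := if dc.2 ≥ k then st.1 + 1 else 0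
  if cont = n then
    if (PySem.List.slice cs (some (dc.1 - n + 1)) (some (dc.1 + 1))).sum ≥ criteria then
      (1, st.2 ++ [key])
    else (cont, st.2)
  else (cont, st.2)

-- rolling-window reformulation of A's scan: state (cont, window, hits)
def stepB (n k criteria : Int) (st : Int × List Int × Int) (c : Int) : Int × List Int × Int :=
  let cont := if c ≥ k then st.1 + 1 else 0
  let window := st.2.1 ++ [c]
  let window := if (window.length : Int) > n then window.tail else window
  if cont = n ∧ window.sum ≥ criteria then (1, window, st.2.2 + 1) else (cont, window, st.2.2)

-- the rolling window after consuming prefix p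
def windowOf (n : Int) (p : List Int) : List Int :=
  if 0 ≤ n then p.drop (p.length - n.toNat) else []

-- A's per-keyword number of selections, via the rolling-window scan
def hitsOf (n k criteria : Int) (cs : List Int) : Int :=
  (cs.foldl (stepB n k criteria) (0, [], 0)).2.2

-- run splitting as a structural recursion (= runsB, proved below)
def runsAux (k : Int) (cur : List Int) : List Int → List (List Int)
  | [] => if cur ≠ [] then [cur] else []
  | c :: cs =>
    if c ≥ k then runsAux k (cur ++ [c]) cs
    else (if cur ≠ [] then [cur] else []) ++ runsAux k [] cs

-- "p is a strictly better answer than q": more selections, or same and smaller key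
def pLT (p q : String × Int) : Prop := q.2 < p.2 ∨ (q.2 = p.2 ∧ p.1 < q.1)

-- reference selection fold (bestB over a list of (key, hits) pairs)
def bestB (items : List (String × Int)) : Option (String × Int) :=
  items.foldl (fun best kc =>
    match best with
    | none => some kc
    | some b => if kc.2 > b.2 ∨ (kc.2 = b.2 ∧ kc.1 < b.1) then some kc else some b) none

theorem innerA_eq (cs : List Int) (n k criteria : Int) (key : String) (best : List String) :
    innerA cs n k criteria key best
      = (PySem.List.enumerate cs 0).foldl (stepA cs n k criteria key) (0, best) := rfl

theorem dayCount_eq (research : List (List String)) : dayCountB research = dayCountA research := by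
  simp [dayCountA, dayCountB, PySem.Dict.foldl_insert_getD_add_one_eq_counter]

theorem windowOf_nil (n : Int) : windowOf n [] = [] := by
  simp [windowOf]

theorem window_step (n : Int) (p : List Int) (c : Int) :
    (if ((windowOf n p ++ [c]).length : Int) > n then (windowOf n p ++ [c]).tail
     else windowOf n p ++ [c]) = windowOf n (p ++ [c]) := by
  by_cases hn : 0 ≤ n
  · have hnN : n = (n.toNat : Int) := (Int.toNat_of_nonneg hn).symm
    simp only [windowOf, if_pos hn]
    by_cases hp : n.toNat ≤ p.length
    · have hlen : ((p.drop (p.length - n.toNat) ++ [c]).length : Int) > n := by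
        simp only [List.length_append, List.length_drop, List.length_cons, List.length_nil]
        omega
      rw [if_pos hlen,
        ← List.drop_append_of_le_length (by omega : p.length - n.toNat ≤ p.length),
        List.tail_drop]
      congr 1
      simp only [List.length_append, List.length_cons, List.length_nil]
      omega
    · have hlen : ¬ ((p.drop (p.length - n.toNat) ++ [c]).length : Int) > n := by
        simp only [List.length_append, List.length_drop, List.length_cons, List.length_nil,
          not_lt]
        omega
      rw [if_neg hlen]
      have e1 : p.length - n.toNat = 0 := by omega
      have e2 : (p ++ [c]).length - n.toNat = 0 := by
        simp only [List.length_append, List.length_cons, List.length_nil]; omega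
      rw [e1, e2, List.drop_zero, List.drop_zero]
  · simp only [windowOf, if_neg hn, List.nil_append]
    have : ((([c] : List Int)).length : Int) > n := by simp; omega
    rw [if_pos this]
    rfl

theorem slice_window (n : Int) (p : List Int) (c : Int) (rest : List Int)
    (h0 : 0 ≤ n) (h1 : n ≤ (p.length : Int) + 1) :
    (PySem.List.slice (p ++ c :: rest) (some ((p.length : Int) - n + 1))
      (some ((p.length : Int) + 1))) = windowOf n (p ++ [c]) := by
  have ea : (p.length : Int) - n + 1 = ((p.length + 1 - n.toNat : Nat) : Int) := by omega
  have eb : (p.length : Int) + 1 = ((p.length + 1 : Nat) : Int) := by omega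
  rw [ea, eb, PySem.List.slice_natCast]
  have hsplit : p ++ c :: rest = (p ++ [c]) ++ rest := by simp
  rw [hsplit, List.drop_append_of_le_length
    (by simp only [List.length_append, List.length_cons, List.length_nil]; omega)]
  have hlen : (List.drop (p.length + 1 - n.toNat) (p ++ [c])).length
      = p.length + 1 - (p.length + 1 - n.toNat) := by
    simp only [List.length_drop, List.length_append, List.length_cons, List.length_nil]
  rw [List.take_append_of_le_length (by omega)]
  have : List.take (p.length + 1 - (p.length + 1 - n.toNat))
      (List.drop (p.length + 1 - n.toNat) (p ++ [c]))
      = List.drop (p.length + 1 - n.toNat) (p ++ [c]) := by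
    apply List.take_of_length_le
    omega
  rw [this]
  simp only [windowOf, if_pos h0, List.length_append, List.length_cons, List.length_nil]

theorem loopAB (n k criteria : Int) (key : String) (cs : List Int) :
    ∀ (rest p : List Int) (cont h : Int) (best : List String),
      cs = p ++ rest → 0 ≤ cont → cont ≤ (p.length : Int) →
      ((PySem.List.enumerate rest (p.length : Int)).foldl
          (stepA cs n k criteria key) (cont, best)).1
        = (rest.foldl (stepB n k criteria) (cont, windowOf n p, h)).1
      ∧ ((PySem.List.enumerate rest (p.length : Int)).foldl
          (stepA cs n k criteria key) (cont, best)).2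
        = best ++ List.replicate
            ((rest.foldl (stepB n k criteria) (cont, windowOf n p, h)).2.2 - h).toNat key
      ∧ h ≤ (rest.foldl (stepB n k criteria) (cont, windowOf n p, h)).2.2 := by
  intro rest
  induction rest with
  | nil =>
    intro p cont h best hcs hc0 hc1
    simp [PySem.List.enumerate]
  | cons c rest ih =>
    intro p cont h best hcs hc0 hc1
    rw [PySem.List.enumerate_cons]
    simp only [List.foldl_cons]
    have hstepA : stepA cs n k criteria key (cont, best) ((p.length : Int), c)
        = (if (if c ≥ k then cont + 1 else 0) = n then
            if (PySem.List.slice cs (some ((p.length : Int) - n + 1))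
                (some ((p.length : Int) + 1))).sum ≥ criteria
            then (1, best ++ [key])
            else ((if c ≥ k then cont + 1 else 0), best)
          else ((if c ≥ k then cont + 1 else 0), best)) := rfl
    have hstepB : stepB n k criteria (cont, windowOf n p, h) c
        = (if (if c ≥ k then cont + 1 else 0) = n ∧ (windowOf n (p ++ [c])).sum ≥ criteria
          then ((1 : Int), windowOf n (p ++ [c]), h + 1)
          else ((if c ≥ k then cont + 1 else 0), windowOf n (p ++ [c]), h)) := by
      simp only [stepB]
      rw [window_step]
    have hcs' : cs = (p ++ [c]) ++ rest := by rw [hcs]; simp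
    have hidx : (p.length : Int) + 1 = (((p ++ [c]).length : Nat) : Int) := by simp
    have hc'01 : 0 ≤ (if c ≥ k then cont + 1 else 0)
        ∧ (if c ≥ k then cont + 1 else 0) ≤ (p.length : Int) + 1 := by
      split <;> omega
    rw [hstepA, hstepB]
    by_cases hn : (if c ≥ k then cont + 1 else 0) = n
    · have hsl : (PySem.List.slice cs (some ((p.length : Int) - n + 1))
          (some ((p.length : Int) + 1))) = windowOf n (p ++ [c]) := by
        rw [hcs]
        exact slice_window n p c rest (hn ▸ hc'01.1) (hn ▸ hc'01.2)
      rw [if_pos hn, hsl]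
      by_cases hsum : (windowOf n (p ++ [c])).sum ≥ criteria
      · rw [if_pos hsum, if_pos ⟨hn, hsum⟩, hidx]
        obtain ⟨e1, e2, e3⟩ := ih (p ++ [c]) 1 (h + 1) (best ++ [key]) hcs' (by omega)
          (by simp only [List.length_append, List.length_cons, List.length_nil]; push_cast; omega)
        refine ⟨e1, ?_, by omega⟩
        rw [e2, List.append_assoc]
        congr 1
        have : ((rest.foldl (stepB n k criteria) (1, windowOf n (p ++ [c]), h + 1)).2.2 - h).toNat
            = ((rest.foldl (stepB n k criteria) (1, windowOf n (p ++ [c]), h + 1)).2.2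
                - (h + 1)).toNat + 1 := by omega
        rw [this, List.replicate_succ]
        rfl
      · have hB : ¬ ((if c ≥ k then cont + 1 else 0) = n
            ∧ (windowOf n (p ++ [c])).sum ≥ criteria) := fun hh => hsum hh.2
        rw [if_neg hsum, if_neg hB, hidx]
        exact ih (p ++ [c]) (if c ≥ k then cont + 1 else 0) h best hcs' hc'01.1
          (by simp only [List.length_append, List.length_cons, List.length_nil]; push_cast; omega)
    · have hB : ¬ ((if c ≥ k then cont + 1 else 0) = n
          ∧ (windowOf n (p ++ [c])).sum ≥ criteria) := fun hh => hn hh.1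
      rw [if_neg hn, if_neg hB, hidx]
      exact ih (p ++ [c]) (if c ≥ k then cont + 1 else 0) h best hcs' hc'01.1
        (by simp only [List.length_append, List.length_cons, List.length_nil]; push_cast; omega)

theorem hits_small (n k criteria : Int) :
    ∀ (rest : List Int) (cont : Int) (w : List Int) (h : Int),
      0 ≤ cont → cont + (rest.length : Int) < n →
      (rest.foldl (stepB n k criteria) (cont, w, h)).2.2 = h := by
  intro rest
  induction rest with
  | nil => intro cont w h _ _; rfl
  | cons c rest ih =>
    intro cont w h hc0 hlt
    simp only [List.length_cons] at hlt
    push_cast at hlt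
    have hB : ¬ ((if c ≥ k then cont + 1 else 0) = n ∧
        (if (((w ++ [c]).length : Nat) : Int) > n then (w ++ [c]).tail else w ++ [c]).sum
          ≥ criteria) := by
      intro hh
      rcases hh with ⟨h1, -⟩
      revert h1
      split <;> omega
    have hstep : stepB n k criteria (cont, w, h) c
        = ((if c ≥ k then cont + 1 else 0),
           (if (((w ++ [c]).length : Nat) : Int) > n then (w ++ [c]).tail else w ++ [c]), h) := by
      simp only [stepB]
      rw [if_neg hB]
    rw [List.foldl_cons, hstep]
    exact ih _ _ _ (by split <;> omega) (by split <;> omega)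

theorem perKey (n k criteria : Int) (key : String) (cs : List Int) (best : List String) :
    (if ((cs.length : Int) < n) then best else (innerA cs n k criteria key best).2)
      = best ++ List.replicate (hitsOf n k criteria cs).toNat key := by
  by_cases hlen : (cs.length : Int) < n
  · rw [if_pos hlen]
    have h0 : hitsOf n k criteria cs = 0 := by
      simpa [hitsOf] using hits_small n k criteria cs 0 [] 0 le_rfl (by omega)
    rw [h0]
    simp
  · rw [if_neg hlen, innerA_eq]
    have := (loopAB n k criteria key cs cs [] 0 0 best (by simp) le_rfl (by simp)).2.1
    simpa [hitsOf, windowOf_nil] using this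

-- ---- run decomposition: hitsOf = hitsB ----

theorem runsB_fold (k : Int) :
    ∀ (cs : List Int) (out : List (List Int)) (cur : List Int),
      (let p := cs.foldl (fun (st : List (List Int) × List Int) c =>
          if c ≥ k then (st.1, st.2 ++ [c])
          else ((if st.2 ≠ [] then st.1 ++ [st.2] else st.1), ([] : List Int))) (out, cur)
       if p.2 ≠ [] then p.1 ++ [p.2] else p.1) = out ++ runsAux k cur cs := by
  intro cs
  induction cs with
  | nil =>
    intro out cur
    simp only [List.foldl_nil, runsAux]
    split <;> simp
  | cons c cs ih =>
    intro out cur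
    simp only [List.foldl_cons, runsAux]
    by_cases hc : c ≥ k
    · rw [if_pos hc, if_pos hc]
      exact ih out (cur ++ [c])
    · rw [if_neg hc, if_neg hc]
      rw [ih _ []]
      split <;> simp

theorem runsB_eq (k : Int) (cs : List Int) : runsB k cs = runsAux k [] cs := by
  have := runsB_fold k cs [] []
  simpa [runsB] using this

theorem runsAux_ge (k : Int) :
    ∀ (r : List Int), (∀ x ∈ r, x ≥ k) → ∀ (cur cs : List Int),
      runsAux k cur (r ++ cs) = runsAux k (cur ++ r) cs := by
  intro r
  induction r with
  | nil => intro _ cur cs; simp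
  | cons x r ih =>
    intro hge cur cs
    simp only [List.cons_append, runsAux, if_pos (hge x List.mem_cons_self)]
    rw [ih (fun y hy => hge y (List.mem_cons_of_mem _ hy)) (cur ++ [x]) cs]
    simp

-- prefB computes the prefix sums
theorem prefB_fold :
    ∀ (run : List Int) (p : List Int) (s : Int),
      (run.foldl (fun (st : List Int × Int) c => (st.1 ++ [st.2 + c], st.2 + c)) (p, s)).1
        = p ++ (List.range run.length).map (fun i => s + (run.take (i+1)).sum) := by
  intro run
  induction run with
  | nil => intro p s; simp
  | cons c run ih =>
    intro p s
    simp only [List.foldl_cons]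
    rw [ih (p ++ [s + c]) (s + c)]
    simp only [List.length_cons, List.range_succ_eq_map, List.map_cons, List.map_map]
    simp [Function.comp_def, List.append_assoc, add_assoc]

theorem prefB_get (run : List Int) (i : Nat) (hi : i ≤ run.length) :
    (PySem.List.pyGet? (prefB run) (i : Int)).getD 0 = ((run.take i).sum : Int) := by
  have hpref : prefB run
      = [0] ++ (List.range run.length).map (fun j => 0 + (run.take (j+1)).sum) := by
    simpa [prefB] using prefB_fold run [(0:Int)] 0
  rw [PySem.List.pyGet?_natCast, hpref]
  rcases i with _ | j
  · simp
  · have hj : j < run.length := by omega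
    rw [List.getElem?_append_right (by simp)]
    simp [hj]

theorem walkAux_hits (n criteria len : Int) (pref : List Int) :
    ∀ (f : Nat) (pos h : Int),
      walkAux n criteria len pref f pos h = h + walkAux n criteria len pref f pos 0 := by
  intro f
  induction f with
  | zero => intro pos h; simp [walkAux]
  | succ f ih =>
    intro pos h
    simp only [walkAux]
    split
    · split
      · omega
      · rw [ih _ (h + 1), ih _ (0 + 1)]
        omega
    · omega

theorem walkAux_oob (n criteria len : Int) (pref : List Int) (f : Nat) (pos h : Int)
    (hpos : len ≤ pos) : walkAux n criteria len pref f pos h = h := by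
  cases f with
  | zero => rfl
  | succ f =>
    simp only [walkAux]
    rw [if_neg (by omega)]

theorem walkAux_neg (n criteria len : Int) (pref : List Int) (f : Nat) (pos h : Int)
    (hpos : pos < 0) : walkAux n criteria len pref f pos h = h := by
  cases f with
  | zero => rfl
  | succ f =>
    simp only [walkAux]
    rw [if_neg (by omega)]

-- sum of the rolling window when it is full
theorem windowOf_sum (n : Int) (hn : 0 ≤ n) (l : List Int) (hl : n ≤ (l.length : Int)) :
    (windowOf n l).sum = l.sum - (l.take (l.length - n.toNat)).sum := by
  simp only [windowOf, if_pos hn]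
  have := List.take_append_drop (l.length - n.toNat) l
  have hsum : (l.take (l.length - n.toNat)).sum + (l.drop (l.length - n.toNat)).sum = l.sum := by
    rw [← List.sum_append, this]
  omega

-- once cont ≥ n inside a run, no further trigger fires
theorem deadAfter (n k criteria : Int) (hn : 1 ≤ n) :
    ∀ (xs : List Int), (∀ x ∈ xs, x ≥ k) → ∀ (c : Int), n ≤ c → ∀ (p : List Int) (h : Int),
      (xs.foldl (stepB n k criteria) (c, windowOf n p, h)).2.1 = windowOf n (p ++ xs)
      ∧ (xs.foldl (stepB n k criteria) (c, windowOf n p, h)).2.2 = h := by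
  intro xs
  induction xs with
  | nil => intro _ c _ p h; simp
  | cons x xs ih =>
    intro hge c hc p h
    have hxk : x ≥ k := hge x List.mem_cons_self
    have hstep : stepB n k criteria (c, windowOf n p, h) x
        = (c + 1, windowOf n (p ++ [x]), h) := by
      simp only [stepB, if_pos hxk]
      rw [window_step, if_neg (fun hh => by omega)]
    rw [List.foldl_cons, hstep]
    have := ih (fun y hy => hge y (List.mem_cons_of_mem _ hy)) (c + 1) (by omega) (p ++ [x]) h
    refine ⟨by rw [this.1]; simp [List.append_assoc], this.2⟩

-- scanning a run suffix: the rolling scan agrees with walkAux on the run's prefix sums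
theorem runLoop (n k criteria : Int) (hn : 1 ≤ n) :
    ∀ (xs q r : List Int), r = q ++ xs → (∀ x ∈ r, x ≥ k) →
      ∀ (c h : Int) (p0 : List Int) (f : Nat),
        0 ≤ c → c < n → c ≤ (q.length : Int) → xs.length ≤ f →
        (xs.foldl (stepB n k criteria) (c, windowOf n (p0 ++ q), h)).2.1
            = windowOf n (p0 ++ q ++ xs)
        ∧ (xs.foldl (stepB n k criteria) (c, windowOf n (p0 ++ q), h)).2.2
            = h + walkAux n criteria (r.length : Int) (prefB r) f
                ((q.length : Int) + (n - c) - 1) 0 := by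
  intro xs
  induction xs with
  | nil =>
    intro q r hr hge c h p0 f hc0 hcn hcq hf
    have hpos : (r.length : Int) ≤ (q.length : Int) + (n - c) - 1 := by
      subst hr; simp; omega
    rw [walkAux_oob n criteria _ _ f _ 0 hpos]
    simp
  | cons x xs ih =>
    intro q r hr hge c h p0 f hc0 hcn hcq hf
    cases f with
    | zero => simp at hf
    | succ f =>
    have hxk : x ≥ k := hge x (by rw [hr]; exact List.mem_append_right _ List.mem_cons_self)
    have hstep : stepB n k criteria (c, windowOf n (p0 ++ q), h) x
        = (if c + 1 = n ∧ (windowOf n (p0 ++ q ++ [x])).sum ≥ criteria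
           then ((1:Int), windowOf n (p0 ++ q ++ [x]), h + 1)
           else (c + 1, windowOf n (p0 ++ q ++ [x]), h)) := by
      simp only [stepB, if_pos hxk]
      rw [window_step]
    rw [List.foldl_cons, hstep]
    have hr' : r = (q ++ [x]) ++ xs := by rw [hr]; simp
    have hrlen : r.length = q.length + 1 + xs.length := by rw [hr']; simp; omega
    have hxf : xs.length ≤ f := by simpa using hf
    have hassoc1 : p0 ++ (q ++ [x]) = p0 ++ q ++ [x] := (List.append_assoc p0 q [x]).symm
    have hassoc2 : p0 ++ q ++ [x] ++ xs = p0 ++ q ++ x :: xs := by simp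
    by_cases htrig : c + 1 = n
    · -- check position: pos0 = q.length
      have hpos0 : (q.length : Int) + (n - c) - 1 = (q.length : Int) := by omega
      have hqn : n ≤ (q.length : Int) + 1 := by omega
      have hwin : (windowOf n (p0 ++ q ++ [x])).sum
          = ((r.take (q.length + 1)).sum - (r.take (q.length + 1 - n.toNat)).sum) := by
        have e1 : windowOf n (p0 ++ q ++ [x]) = windowOf n (q ++ [x]) := by
          simp only [windowOf, if_pos (by omega : (0:Int) ≤ n)]
          rw [List.append_assoc]
          have hm : (p0 ++ (q ++ [x])).length - n.toNat
              = p0.length + ((q ++ [x]).length - n.toNat) := by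
            simp only [List.length_append, List.length_cons, List.length_nil]
            omega
          rw [hm, List.drop_length_add_append]
        rw [e1, windowOf_sum n (by omega) (q ++ [x])
          (by simp only [List.length_append, List.length_cons, List.length_nil]; push_cast; omega)]
        have htk : q ++ [x] = r.take (q.length + 1) := by
          rw [hr']
          rw [List.take_append_of_le_length
            (by simp only [List.length_append, List.length_cons, List.length_nil]; omega)]
          simp
        have htk2 : (q ++ [x]).take ((q ++ [x]).length - n.toNat)
            = r.take (q.length + 1 - n.toNat) := by
          rw [htk, List.take_take]
          congr 1
          simp only [List.length_take, List.length_append, List.length_cons, List.length_nil]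
          omega
        rw [htk2, htk]
      -- prefix-sum values at the checked indices
      have hg1 : (PySem.List.pyGet? (prefB r) ((q.length : Int) + 1)).getD 0
          = ((r.take (q.length + 1)).sum) := by
        have hidx : (q.length : Int) + 1 = ((q.length + 1 : Nat) : Int) := by push_cast; ring
        rw [hidx]
        exact prefB_get r (q.length + 1) (by omega)
      have hg2 : (PySem.List.pyGet? (prefB r) ((q.length : Int) + 1 - n)).getD 0
          = ((r.take (q.length + 1 - n.toNat)).sum) := by
        have hidx : (q.length : Int) + 1 - n = ((q.length + 1 - n.toNat : Nat) : Int) := by omega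
        rw [hidx]
        exact prefB_get r (q.length + 1 - n.toNat) (by omega)
      have hcond : (0 ≤ (q.length : Int) ∧ (q.length : Int) < (r.length : Int) ∧
          (PySem.List.pyGet? (prefB r) ((q.length : Int)+1)).getD 0
            - (PySem.List.pyGet? (prefB r) ((q.length : Int)+1-n)).getD 0 ≥ criteria)
          ↔ (windowOf n (p0 ++ q ++ [x])).sum ≥ criteria := by
        rw [hg1, hg2, hwin]
        constructor
        · intro hh; exact hh.2.2
        · intro hh
          refine ⟨by omega, by omega, hh⟩
      rw [hpos0]
      by_cases hsum : (windowOf n (p0 ++ q ++ [x])).sum ≥ criteria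
      · rw [if_pos ⟨htrig, hsum⟩]
        simp only [walkAux]
        rw [if_pos (hcond.mpr hsum)]
        by_cases h1 : n = 1
        · -- dead after the single allowed hit
          rw [if_pos h1]
          have hdead := deadAfter n k criteria hn xs
            (fun y hy => hge y (by rw [hr']; exact List.mem_append_right _ hy))
            1 (by omega) (p0 ++ q ++ [x]) (h + 1)
          rw [hassoc2] at hdead
          exact ⟨hdead.1, by rw [hdead.2]; omega⟩
        · rw [if_neg h1]
          have hih := ih (q ++ [x]) r hr'
            hge 1 (h + 1) p0 f (by omega) (by omega)
            (by simp only [List.length_append, List.length_cons, List.length_nil]; push_cast; omega)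
            hxf
          rw [hassoc1, hassoc2] at hih
          refine ⟨hih.1, ?_⟩
          rw [hih.2, walkAux_hits n criteria _ _ f _ (0+1)]
          have hargs : ((q ++ [x]).length : Int) + (n - 1) - 1 = (q.length : Int) + (n - 1) := by
            simp only [List.length_append, List.length_cons, List.length_nil]
            push_cast; ring
          rw [hargs]
          omega
      · rw [if_neg (fun hh => hsum hh.2)]
        simp only [walkAux]
        rw [if_neg (fun hh => hsum (hcond.mp hh))]
        -- cont reaches n and the check failed: dead for the rest of the run
        have hdead := deadAfter n k criteria hn xs
          (fun y hy => hge y (by rw [hr']; exact List.mem_append_right _ hy))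
          (c + 1) (by omega) (p0 ++ q ++ [x]) h
        rw [hassoc2] at hdead
        exact ⟨hdead.1, by rw [hdead.2]; ring⟩
    · -- no trigger: cont grows, same check position
      rw [if_neg (fun hh => htrig hh.1)]
      have hih := ih (q ++ [x]) r hr' hge (c + 1) h p0 (f + 1) (by omega) (by omega)
        (by simp only [List.length_append, List.length_cons, List.length_nil]; push_cast; omega)
        (by omega)
      rw [hassoc1, hassoc2] at hih
      refine ⟨hih.1, ?_⟩
      rw [hih.2]
      have hargs : ((q ++ [x]).length : Int) + (n - (c+1)) - 1
          = (q.length : Int) + (n - c) - 1 := by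
        simp only [List.length_append, List.length_cons, List.length_nil]
        push_cast; ring
      rw [hargs]


-- main: the rolling scan over cs equals the sum of walks over the maximal runs
theorem scanRuns (n k criteria : Int) (hn : 1 ≤ n) :
    ∀ (m : Nat) (cs : List Int), cs.length ≤ m → ∀ (p : List Int) (h : Int),
      (cs.foldl (stepB n k criteria) (0, windowOf n p, h)).2.2
        = h + ((runsAux k [] cs).map (walkB n criteria)).sum := by
  intro m
  induction m with
  | zero =>
    intro cs hcs p h
    have : cs = [] := List.length_eq_zero_iff.mp (by omega)
    subst this
    simp [runsAux]
  | succ m ih =>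
    intro cs hcs p h
    cases cs with
    | nil => simp [runsAux]
    | cons c cs' =>
    by_cases hc : c ≥ k
    · -- take the maximal run
      set t := (c :: cs').takeWhile (fun x => decide (x ≥ k)) with ht
      have hsplit : c :: cs' = t ++ (c :: cs').dropWhile (fun x => decide (x ≥ k)) :=
        (List.takeWhile_append_dropWhile).symm
      have htge : ∀ x ∈ t, x ≥ k := by
        intro x hx
        have := List.mem_takeWhile_imp hx
        simpa using this
      have htne : t ≠ [] := by
        rw [ht]
        simp only [List.takeWhile_cons]
        rw [if_pos (by simpa using hc)]
        simp
      -- fold over t via runLoop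
      have hrl := runLoop n k criteria hn t [] t (by simp) htge 0 h p t.length
        le_rfl (by omega) (by simp) le_rfl
      simp only [List.append_nil, List.nil_append] at hrl
      have hpos0 : ((([] : List Int).length : Int) + (n - 0) - 1) = n - 1 := by simp
      rw [hsplit, List.foldl_append]
      obtain ⟨hw, hh⟩ := hrl
      have hwalk : (t.foldl (stepB n k criteria) (0, windowOf n p, h)).2.2
          = h + walkB n criteria t := by
        rw [hh]
        simp [walkB, hpos0]
      set s := t.foldl (stepB n k criteria) (0, windowOf n p, h) with hs
      have hsexp : s = (s.1, windowOf n (p ++ t), h + walkB n criteria t) := by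
        have : s = (s.1, s.2.1, s.2.2) := rfl
        rw [this, hw, hwalk]
      cases hdd : (c :: cs').dropWhile (fun x => decide (x ≥ k)) with
      | nil =>
        rw [hdd] at hsplit
        simp only [List.foldl_nil]
        rw [runsAux_ge k t htge [] []]
        have hro : runsAux k ([] ++ t) [] = [t] := by simp [runsAux, htne]
        rw [hro, hwalk]
        simp
      | cons e d' =>
        have hed : ¬ (e ≥ k) := by
          have hne' : (c :: cs').dropWhile (fun x => decide (x ≥ k)) ≠ [] := by
            rw [hdd]; simp
          have h2 := List.head_dropWhile_not (fun x => decide (x ≥ k)) hne'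
          have h3 : ((c :: cs').dropWhile (fun x => decide (x ≥ k))).head hne' = e := by
            simp [hdd]
          rw [h3] at h2
          simpa using h2
        rw [hdd] at hsplit
        rw [runsAux_ge k t htge [] (e :: d')]
        have hro : runsAux k ([] ++ t) (e :: d') = t :: runsAux k [] d' := by
          simp only [List.nil_append, runsAux, if_neg hed]
          simp [htne]
        rw [hro]
        have hstep : stepB n k criteria (s.1, windowOf n (p ++ t), h + walkB n criteria t) e
            = (0, windowOf n ((p ++ t) ++ [e]), h + walkB n criteria t) := by
          simp only [stepB, if_neg hed]
          rw [window_step, if_neg (fun hh => by omega)]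
        rw [List.foldl_cons, hsexp, hstep]
        have hlen : d'.length ≤ m := by
          have h1 : t.length + (e :: d').length = (c :: cs').length := by
            rw [hsplit]; simp
          have h2 : 1 ≤ t.length := List.length_pos_of_ne_nil htne
          simp only [List.length_cons] at h1 hcs
          omega
        rw [ih d' hlen ((p ++ t) ++ [e]) (h + walkB n criteria t)]
        simp only [List.map_cons, List.sum_cons]
        ring
    · -- leading non-run element
      have hstep : stepB n k criteria (0, windowOf n p, h) c
          = (0, windowOf n (p ++ [c]), h) := by
        simp only [stepB, if_neg hc]
        rw [window_step, if_neg (fun hh => by omega)]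
      rw [List.foldl_cons, hstep]
      have hlen : cs'.length ≤ m := by simpa using hcs
      rw [ih cs' hlen (p ++ [c]) h]
      have : runsAux k [] (c :: cs') = runsAux k [] cs' := by
        simp [runsAux, hc]
      rw [this]

theorem foldl_add_sum (f : List Int → Int) :
    ∀ (l : List (List Int)) (s : Int), l.foldl (fun s r => s + f r) s = s + (l.map f).sum := by
  intro l
  induction l with
  | nil => intro s; simp
  | cons r l ih => intro s; simp [ih]; ring

theorem hits_eq (n k criteria : Int) (hn : n ≠ 0) (cs : List Int) :
    hitsOf n k criteria cs = hitsB n k criteria cs := by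
  rcases lt_trichotomy n 0 with hneg | hz | hpos
  case inr.inl => exact absurd hz hn
  · -- n < 0 : both sides are 0
    have hA : hitsOf n k criteria cs = 0 := by
      have main : ∀ (l : List Int) (c : Int) (w : List Int) (h : Int), 0 ≤ c →
          (l.foldl (stepB n k criteria) (c, w, h)).2.2 = h := by
        intro l
        induction l with
        | nil => intro c w h _; rfl
        | cons x l ih =>
          intro c w h hc
          have hB : ¬ ((if x ≥ k then c + 1 else 0) = n ∧
              (if (((w ++ [x]).length : Nat) : Int) > n then (w ++ [x]).tail else w ++ [x]).sum
                ≥ criteria) := by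
            intro hh
            rcases hh with ⟨h1, -⟩
            revert h1
            split <;> omega
          have hstep : stepB n k criteria (c, w, h) x
              = ((if x ≥ k then c + 1 else 0),
                 (if (((w ++ [x]).length : Nat) : Int) > n then (w ++ [x]).tail else w ++ [x]),
                 h) := by
            simp only [stepB]
            rw [if_neg hB]
          rw [List.foldl_cons, hstep]
          exact ih _ _ _ (by split <;> omega)
      simpa [hitsOf] using main cs 0 [] 0 le_rfl
    have hBz : hitsB n k criteria cs = 0 := by
      simp only [hitsB]
      rw [foldl_add_sum]
      have : ∀ r ∈ (runsB k cs).map (walkB n criteria), r = 0 := by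
        intro r hr
        obtain ⟨run, _, rfl⟩ := List.mem_map.mp hr
        simp only [walkB]
        exact walkAux_neg n criteria _ _ _ _ 0 (by omega)
      rw [List.sum_eq_zero this]
      simp
    rw [hA, hBz]
  · have hn1 : 1 ≤ n := by omega
    have := scanRuns n k criteria hn1 cs.length cs le_rfl [] 0
    simp only [windowOf_nil] at this
    rw [hitsOf, this, hitsB, runsB_eq, foldl_add_sum]

theorem hitsB_nonneg (n k criteria : Int) (cs : List Int) : 0 ≤ hitsB n k criteria cs := by
  simp only [hitsB]
  rw [foldl_add_sum]
  have : ∀ r ∈ (runsB k cs).map (walkB n criteria), 0 ≤ r := by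
    intro r hr
    obtain ⟨run, _, rfl⟩ := List.mem_map.mp hr
    simp only [walkB]
    have gen : ∀ (f : Nat) (pos h : Int), h ≤ walkAux n criteria (run.length : Int)
        (prefB run) f pos h := by
      intro f
      induction f with
      | zero => intro pos h; simp [walkAux]
      | succ f ih =>
        intro pos h
        simp only [walkAux]
        split
        · split
          · omega
          · have := ih (pos + (n - 1)) (h + 1)
            omega
        · omega
    simpa using gen run.length (n - 1) 0
  simpa using List.sum_nonneg this

-- ---- phase-2 aggregation (A side) ----

theorem nodup_keys_dayCountA (research : List (List String)) :
    (dayCountA research).keys.Nodup := by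
  have main : ∀ (rs : List (List String)) (d : PySem.Dict String (List Int)), d.keys.Nodup →
      (rs.foldl (fun d day_keyword =>
        (PySem.Dict.counter day_keyword).items.foldl
          (fun d p => d.modify p.1 [] (· ++ [p.2])) d) d).keys.Nodup := by
    intro rs
    induction rs with
    | nil => intro d hd; exact hd
    | cons r rs ih =>
      intro d hd
      exact ih _ (PySem.Dict.nodup_keys_foldl_modify_key _ Prod.fst [] (fun _ p => (· ++ [p.2])) d hd)
  exact main research _ PySem.Dict.nodup_keys_empty

theorem best_issue_eq (research : List (List String)) (n k criteria : Int) :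
    ((dayCountA research).keys.foldl (fun best key =>
        if (((dayCountA research).getD key []).length : Int) < n then best
        else (innerA ((dayCountA research).getD key []) n k criteria key best).2) [])
      = (dayCountA research).keys.flatMap (fun key =>
          List.replicate (hitsOf n k criteria ((dayCountA research).getD key [])).toNat key) := by
  have hfun : (fun (best : List String) key =>
      if (((dayCountA research).getD key []).length : Int) < n then best
      else (innerA ((dayCountA research).getD key []) n k criteria key best).2)
      = fun best key => best ++ List.replicate
          (hitsOf n k criteria ((dayCountA research).getD key [])).toNat key := by
    funext best key
    exact perKey n k criteria key _ best
  rw [hfun, PySem.List.foldl_append_eq_flatMap]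
  simp

-- B's selection fold, reduced to bestB over the filtered (key, hits) list
theorem bestFold_eq (n k criteria : Int) :
    ∀ (kvs : List (String × List Int)) (acc : Option (String × Int)),
      kvs.foldl (fun (best : Option (String × Int)) kc =>
          let h := hitsB n k criteria kc.2
          match best with
          | none => if h ≠ 0 then some (kc.1, h) else none
          | some b => if h ≠ 0 ∧ (h > b.2 ∨ (h = b.2 ∧ kc.1 < b.1)) then some (kc.1, h)
                      else some b) acc
        = ((kvs.filter (fun kc => hitsB n k criteria kc.2 ≠ 0)).map
            (fun kc => (kc.1, hitsB n k criteria kc.2))).foldl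
            (fun best kc =>
              match best with
              | none => some kc
              | some b => if kc.2 > b.2 ∨ (kc.2 = b.2 ∧ kc.1 < b.1) then some kc else some b)
            acc := by
  intro kvs
  induction kvs with
  | nil => intro acc; rfl
  | cons kv kvs ih =>
    intro acc
    by_cases hh : hitsB n k criteria kv.2 ≠ 0
    · rw [List.foldl_cons]
      have hfil : (kv :: kvs).filter (fun kc => hitsB n k criteria kc.2 ≠ 0)
          = kv :: kvs.filter (fun kc => hitsB n k criteria kc.2 ≠ 0) := by
        simp [List.filter_cons, hh]
      rw [hfil, List.map_cons, List.foldl_cons, ← ih]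
      congr 1
      cases acc with
      | none => simp [hh]
      | some b =>
        by_cases hbet : hitsB n k criteria kv.2 > b.2
            ∨ (hitsB n k criteria kv.2 = b.2 ∧ kv.1 < b.1)
        · simp [hh, hbet]
        · simp [hh, hbet]
    · rw [List.foldl_cons]
      have hfil : (kv :: kvs).filter (fun kc => hitsB n k criteria kc.2 ≠ 0)
          = kvs.filter (fun kc => hitsB n k criteria kc.2 ≠ 0) := by
        simp [List.filter_cons, hh]
      rw [hfil, ← ih]
      rw [not_not] at hh
      congr 1
      cases acc with
      | none => simp [hh]
      | some b => simp [hh]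

-- ---- phase-3: the shared counting/selection argument ----

theorem count_flatMap (ks : List String) (H : String → Nat) (hnd : ks.Nodup) :
    ∀ key ∈ ks, (ks.flatMap (fun a => List.replicate (H a) a)).count key = H key := by
  induction ks with
  | nil => intro key h; simp at h
  | cons a ks ih =>
    simp only [List.nodup_cons] at hnd
    intro key hmem
    rw [List.flatMap_cons, List.count_append]
    rcases List.mem_cons.mp hmem with rfl | hk
    · have hz : (ks.flatMap (fun a => List.replicate (H a) a)).count key = 0 := by
        rw [List.count_eq_zero]
        intro hcon
        obtain ⟨b, hb, hkb⟩ := List.mem_flatMap.mp hcon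
        exact hnd.1 ((List.eq_of_mem_replicate hkb) ▸ hb)
      rw [hz, List.count_replicate]
      simp
    · have hne : (a == key) = false := by
        have : a ≠ key := fun e => hnd.1 (e ▸ hk)
        simpa using this
      rw [List.count_replicate, hne, ih hnd.2 key hk]
      simp

-- the filtered (key, hits) list B effectively selects from
def winsList (research : List (List String)) (n k criteria : Int) : List (String × Int) :=
  ((dayCountA research).keys.filter (fun key =>
      hitsB n k criteria ((dayCountA research).getD key []) ≠ 0)).map
    (fun key => (key, hitsB n k criteria ((dayCountA research).getD key [])))

theorem mem_counter_iff (research : List (List String)) (n k criteria : Int) (p : String × Int) :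
    p ∈ (PySem.Dict.counter ((dayCountA research).keys.flatMap (fun key =>
          List.replicate (hitsB n k criteria ((dayCountA research).getD key [])).toNat key))).items
      ↔ p ∈ winsList research n k criteria := by
  rw [PySem.Dict.items_counter, winsList]
  constructor
  · intro hp
    obtain ⟨key, hkey, rfl⟩ := List.mem_map.mp hp
    have hkbi := (PySem.Set.mem_ofList _ _).mp hkey
    obtain ⟨a, ha, hrep⟩ := List.mem_flatMap.mp hkbi
    obtain ⟨hHa, rfl⟩ := List.mem_replicate.mp hrep
    have hnn := hitsB_nonneg n k criteria ((dayCountA research).getD key [])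
    have hcnt := count_flatMap (dayCountA research).keys
      (fun key => (hitsB n k criteria ((dayCountA research).getD key [])).toNat)
      (nodup_keys_dayCountA research) key ha
    refine List.mem_map.mpr ⟨key, List.mem_filter.mpr ⟨ha, by simp; omega⟩, ?_⟩
    rw [hcnt]
    simp only [Prod.mk.injEq, true_and]
    omega
  · intro hp
    obtain ⟨key, hkf, rfl⟩ := List.mem_map.mp hp
    obtain ⟨hks, hne⟩ := List.mem_filter.mp hkf
    have hnn := hitsB_nonneg n k criteria ((dayCountA research).getD key [])
    simp only [ne_eq, decide_not, Bool.not_eq_true', decide_eq_false_iff_not] at hne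
    have hkbi : key ∈ (dayCountA research).keys.flatMap (fun key =>
        List.replicate (hitsB n k criteria ((dayCountA research).getD key [])).toNat key) :=
      List.mem_flatMap.mpr ⟨key, hks, List.mem_replicate.mpr ⟨by omega, rfl⟩⟩
    have hcnt := count_flatMap (dayCountA research).keys
      (fun key => (hitsB n k criteria ((dayCountA research).getD key [])).toNat)
      (nodup_keys_dayCountA research) key hks
    refine List.mem_map.mpr ⟨key, (PySem.Set.mem_ofList _ _).mpr hkbi, ?_⟩
    rw [hcnt]
    simp only [Prod.mk.injEq, true_and]
    omega

theorem flatMap_ne_nil_iff (research : List (List String)) (n k criteria : Int) :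
    ((dayCountA research).keys.flatMap (fun key =>
        List.replicate (hitsB n k criteria ((dayCountA research).getD key [])).toNat key) ≠ [])
      ↔ winsList research n k criteria ≠ [] := by
  constructor
  · intro hbi
    obtain ⟨x, hx⟩ := List.exists_mem_of_ne_nil _ hbi
    obtain ⟨a, ha, hrep⟩ := List.mem_flatMap.mp hx
    obtain ⟨hHa, rfl⟩ := List.mem_replicate.mp hrep
    have hnn := hitsB_nonneg n k criteria ((dayCountA research).getD x [])
    apply List.ne_nil_of_mem (a := (x, hitsB n k criteria ((dayCountA research).getD x [])))
    exact List.mem_map.mpr ⟨x, List.mem_filter.mpr ⟨ha, by simp; omega⟩, rfl⟩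
  · intro hW
    obtain ⟨y, hy⟩ := List.exists_mem_of_ne_nil _ hW
    obtain ⟨key, hkf, rfl⟩ := List.mem_map.mp hy
    obtain ⟨hks, hne⟩ := List.mem_filter.mp hkf
    have hnn := hitsB_nonneg n k criteria ((dayCountA research).getD key [])
    simp only [ne_eq, decide_not, Bool.not_eq_true', decide_eq_false_iff_not] at hne
    exact List.ne_nil_of_mem (List.mem_flatMap.mpr
      ⟨key, hks, List.mem_replicate.mpr ⟨by omega, rfl⟩⟩)

-- both final selections are the unique pLT-minimal item

theorem pLT_asymm {p q : String × Int} : pLT p q → ¬ pLT q p := by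
  rintro (h | ⟨h1, h2⟩) (g | ⟨g1, g2⟩)
  · omega
  · omega
  · omega
  · exact absurd g2 (lt_asymm h2)

theorem pLT_trans {p q r : String × Int} : pLT p q → pLT q r → pLT p r := by
  rintro (h | ⟨h1, h2⟩) (g | ⟨g1, g2⟩)
  · exact Or.inl (lt_trans g h)
  · exact Or.inl (g1 ▸ h)
  · exact Or.inl (h1 ▸ g)
  · exact Or.inr ⟨g1.trans h1, lt_trans h2 g2⟩

theorem pLT_connex {p q : String × Int} : ¬ pLT p q → ¬ pLT q p → p = q := by
  intro h1 h2
  have e2 : p.2 = q.2 := by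
    rcases lt_trichotomy p.2 q.2 with h | h | h
    · exact absurd (Or.inl h) h2
    · exact h
    · exact absurd (Or.inl h) h1
  have e1 : p.1 = q.1 := by
    rcases lt_trichotomy p.1 q.1 with h | h | h
    · exact absurd (Or.inr ⟨e2.symm, h⟩) h1
    · exact h
    · exact absurd (Or.inr ⟨e2, h⟩) h2
  exact Prod.ext_iff.mpr ⟨e1, e2⟩

def bfun (a b : String × Int) : Bool :=
  decide (-a.2 < -b.2) || (!decide (-b.2 < -a.2) && decide (a.1 < b.1))

theorem bfun_iff (a b : String × Int) : bfun a b = true ↔ pLT a b := by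
  simp only [bfun, pLT, Bool.or_eq_true, Bool.and_eq_true, Bool.not_eq_true',
    decide_eq_true_eq, decide_eq_false_iff_not, not_lt]
  constructor
  · rintro (h | ⟨h1, h2⟩)
    · exact Or.inl (by omega)
    · rcases lt_or_ge b.2 a.2 with h | h
      · exact Or.inl h
      · exact Or.inr ⟨by omega, h2⟩
  · rintro (h | ⟨h1, h2⟩)
    · exact Or.inl (by omega)
    · exact Or.inr ⟨by omega, h2⟩

theorem sorted2_eq (xs : List (String × Int)) :
    PySem.List.sorted2 xs (fun p => -p.2) (fun p => p.1) false
      = xs.foldl (fun acc x => PySem.List.insertBy bfun x acc) [] := rfl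

theorem insertBy_cons_eq {α : Type} (before : α → α → Bool) (x y : α) (t : List α) :
    PySem.List.insertBy before x (y :: t)
      = if before x y then x :: y :: t else y :: PySem.List.insertBy before x t := by
  simp [PySem.List.insertBy]

theorem before_irrefl {α : Type} (before : α → α → Bool)
    (hasym : ∀ a b, before a b = true → before b a = false) (a : α) : before a a = false := by
  cases hxx : before a a
  · rfl
  · have := hasym a a hxx
    rw [hxx] at this
    simp at this

theorem insertBy_minhead {α : Type} (before : α → α → Bool)
    (hasym : ∀ a b, before a b = true → before b a = false)
    (htrans : ∀ a b c, before a b = true → before b c = true → before a c = true)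
    (x m : α) (t : List α) (hmin : ∀ y ∈ m :: t, before y m = false) :
    ∃ m' t', PySem.List.insertBy before x (m :: t) = m' :: t'
      ∧ (∀ y, y ∈ m' :: t' ↔ y = x ∨ y ∈ m :: t)
      ∧ ∀ y ∈ m' :: t', before y m' = false := by
  cases hb : before x m
  · refine ⟨m, PySem.List.insertBy before x t,
      by rw [insertBy_cons_eq, if_neg (by simp [hb])], ?_, ?_⟩
    · intro y
      simp only [List.mem_cons, PySem.List.mem_insertBy]
      tauto
    · intro y hy
      rcases List.mem_cons.mp hy with rfl | hy'
      · exact before_irrefl before hasym y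
      · rcases (PySem.List.mem_insertBy before x y t).mp hy' with rfl | hyt
        · exact hb
        · exact hmin y (List.mem_cons_of_mem _ hyt)
  · refine ⟨x, m :: t, by rw [insertBy_cons_eq, if_pos hb], ?_, ?_⟩
    · intro y
      simp only [List.mem_cons]
    · intro y hy
      rcases List.mem_cons.mp hy with rfl | hy'
      · exact before_irrefl before hasym y
      · rcases List.mem_cons.mp hy' with rfl | hyt
        · exact hasym x y hb
        · cases hyx : before y x
          · rfl
          · have h1 := htrans y x m hyx hb
            have h2 := hmin y (List.mem_cons_of_mem _ hyt)
            rw [h1] at h2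
            simp at h2

theorem foldl_insertBy_min {α : Type} (before : α → α → Bool)
    (hasym : ∀ a b, before a b = true → before b a = false)
    (htrans : ∀ a b c, before a b = true → before b c = true → before a c = true) :
    ∀ (xs : List α) (m : α) (t : List α), (∀ y ∈ m :: t, before y m = false) →
      ∃ m' t', xs.foldl (fun acc x => PySem.List.insertBy before x acc) (m :: t) = m' :: t'
        ∧ (∀ y, y ∈ m' :: t' ↔ y ∈ xs ∨ y ∈ m :: t)
        ∧ ∀ y ∈ m' :: t', before y m' = false := by
  intro xs
  induction xs with
  | nil => intro m t hmin; exact ⟨m, t, rfl, by simp, hmin⟩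
  | cons x xs ih =>
    intro m t hmin
    rw [List.foldl_cons]
    obtain ⟨m', t', heq, hmem, hmin'⟩ := insertBy_minhead before hasym htrans x m t hmin
    rw [heq]
    obtain ⟨m'', t'', heq2, hmem2, hmin2⟩ := ih m' t' hmin'
    refine ⟨m'', t'', heq2, ?_, hmin2⟩
    intro y
    rw [hmem2 y, hmem y]
    simp only [List.mem_cons]
    tauto

theorem pLT_iff' (p b : String × Int) : (p.2 > b.2 ∨ (p.2 = b.2 ∧ p.1 < b.1)) ↔ pLT p b := by
  unfold pLT
  constructor
  · rintro (h | ⟨h1, h2⟩)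
    exacts [Or.inl h, Or.inr ⟨h1.symm, h2⟩]
  · rintro (h | ⟨h1, h2⟩)
    exacts [Or.inl h, Or.inr ⟨h1.symm, h2⟩]

theorem bestB_fold :
    ∀ (l : List (String × Int)) (b : String × Int),
      ∃ m, l.foldl (fun best kc =>
          match best with
          | none => some kc
          | some b => if kc.2 > b.2 ∨ (kc.2 = b.2 ∧ kc.1 < b.1) then some kc else some b)
          (some b) = some m
        ∧ (m = b ∨ m ∈ l) ∧ ¬ pLT b m ∧ ∀ y ∈ l, ¬ pLT y m := by
  intro l
  induction l with
  | nil => intro b; exact ⟨b, rfl, Or.inl rfl, fun h => pLT_asymm h h, by simp⟩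
  | cons p l ih =>
    intro b
    rw [List.foldl_cons]
    show ∃ m, l.foldl _ (if p.2 > b.2 ∨ (p.2 = b.2 ∧ p.1 < b.1) then some p else some b) = some m ∧ _
    by_cases hc : p.2 > b.2 ∨ (p.2 = b.2 ∧ p.1 < b.1)
    · rw [if_pos hc]
      have hpb : pLT p b := (pLT_iff' p b).mp hc
      obtain ⟨m, heq, hm, hbm, hl⟩ := ih p
      refine ⟨m, heq, ?_, ?_, ?_⟩
      · rcases hm with rfl | hm'
        · exact Or.inr List.mem_cons_self
        · exact Or.inr (List.mem_cons_of_mem _ hm')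
      · intro h
        exact hbm (pLT_trans hpb h)
      · intro y hy
        rcases List.mem_cons.mp hy with rfl | hy'
        · exact hbm
        · exact hl y hy'
    · rw [if_neg hc]
      have hpb : ¬ pLT p b := fun hh => hc ((pLT_iff' p b).mpr hh)
      obtain ⟨m, heq, hm, hbm, hl⟩ := ih b
      refine ⟨m, heq, ?_, hbm, ?_⟩
      · rcases hm with rfl | hm'
        · exact Or.inl rfl
        · exact Or.inr (List.mem_cons_of_mem _ hm')
      · intro y hy
        rcases List.mem_cons.mp hy with rfl | hy'
        · intro h
          by_cases hbp : pLT b y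
          · exact hbm (pLT_trans hbp h)
          · rw [pLT_connex hpb hbp] at h
            exact hbm h
        · exact hl y hy'

theorem bestB_min (l : List (String × Int)) (b : String × Int) :
    ∃ m, bestB (b :: l) = some m ∧ (m = b ∨ m ∈ l) ∧ ¬ pLT b m ∧ ∀ y ∈ l, ¬ pLT y m := by
  simp only [bestB, List.foldl_cons]
  exact bestB_fold l b

theorem bfun_asym : ∀ a b : String × Int, bfun a b = true → bfun b a = false := by
  intro a b hab
  cases hv : bfun b a
  · rfl
  · exact absurd ((bfun_iff b a).mp hv) (pLT_asymm ((bfun_iff a b).mp hab))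

theorem bfun_trans : ∀ a b c : String × Int,
    bfun a b = true → bfun b c = true → bfun a c = true := fun a b c h1 h2 =>
  (bfun_iff a c).mpr (pLT_trans ((bfun_iff a b).mp h1) ((bfun_iff b c).mp h2))

-- B's selection equals bestB over winsList
theorem alt_eq_bestB (research : List (List String)) (n k criteria : Int) :
    ((dayCountB research).items.foldl
      (fun (best : Option (String × Int)) kc =>
        let h := hitsB n k criteria kc.2
        match best with
        | none => if h ≠ 0 then some (kc.1, h) else none
        | some b => if h ≠ 0 ∧ (h > b.2 ∨ (h = b.2 ∧ kc.1 < b.1)) then some (kc.1, h)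
                    else some b) none)
      = bestB (winsList research n k criteria) := by
  rw [dayCount_eq, bestFold_eq n k criteria, bestB]
  congr 1
  rw [PySem.Dict.items_eq_map_keys _ (nodup_keys_dayCountA research) ([] : List Int)]
  rw [winsList, List.filter_map, List.map_map]
  simp [Function.comp_def]

-- ===== VERDICT (by name: the statement is the Claim_ definition above) =====
theorem solution_spec : Claim_equal_solution := by
  intro research n k _ hpre
  unfold Spec_solution
  simp only [solution, solution_alt]
  rw [best_issue_eq research n k (2 * n * k)]
  have hfun : (fun key => List.replicate
        (hitsOf n k (2*n*k) ((dayCountA research).getD key [])).toNat key)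
      = fun key => List.replicate
        (hitsB n k (2*n*k) ((dayCountA research).getD key [])).toNat key := by
    funext key
    rw [hits_eq n k (2*n*k) hpre]
  rw [hfun, alt_eq_bestB research n k (2*n*k)]
  by_cases hbi : (dayCountA research).keys.flatMap (fun key =>
      List.replicate (hitsB n k (2 * n * k) ((dayCountA research).getD key [])).toNat key) ≠ []
  · rw [if_pos hbi]
    have hW : winsList research n k (2 * n * k) ≠ [] :=
      (flatMap_ne_nil_iff research n k _).mp hbi
    obtain ⟨b, l, hWeq⟩ := List.exists_cons_of_ne_nil hW
    obtain ⟨mB, hbest, hmB, hbm, hlm⟩ := bestB_min l b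
    have hCI : (PySem.Dict.counter ((dayCountA research).keys.flatMap (fun key =>
        List.replicate (hitsB n k (2 * n * k)
          ((dayCountA research).getD key [])).toNat key))).items ≠ [] := by
      rw [PySem.Dict.items_counter]
      obtain ⟨x, hx⟩ := List.exists_mem_of_ne_nil _ hbi
      exact List.ne_nil_of_mem (List.mem_map_of_mem ((PySem.Set.mem_ofList _ _).mpr hx))
    have hL1 : PySem.List.sorted (PySem.Dict.counter ((dayCountA research).keys.flatMap
        (fun key => List.replicate (hitsB n k (2 * n * k)
          ((dayCountA research).getD key [])).toNat key))).items (fun p => p.2) true ≠ [] := by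
      rw [Ne, PySem.List.sorted_eq_nil_iff]
      exact hCI
    obtain ⟨x, xs, hL1eq⟩ := List.exists_cons_of_ne_nil hL1
    rw [sorted2_eq, hL1eq, List.foldl_cons]
    have e0 : PySem.List.insertBy bfun x [] = [x] := rfl
    rw [e0]
    obtain ⟨mA, tA, heqA, hmemA, hminA⟩ := foldl_insertBy_min bfun bfun_asym bfun_trans xs x []
      (by
        intro y hy
        rcases List.mem_cons.mp hy with rfl | hy'
        · exact before_irrefl bfun bfun_asym y
        · simp at hy')
    rw [heqA]
    simp only [List.headD_cons]
    -- membership transfer between A's candidate list and winsList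
    have hmemW : ∀ y, y ∈ mA :: tA → y ∈ winsList research n k (2 * n * k) := by
      intro y hy
      have h1 := (hmemA y).mp hy
      have h2 : y ∈ x :: xs := by
        rcases h1 with h | h
        · exact List.mem_cons_of_mem _ h
        · rcases List.mem_cons.mp h with rfl | h'
          · exact List.mem_cons_self
          · simp at h'
      rw [← hL1eq] at h2
      have h3 := (PySem.List.mem_sorted _ _ _ _).mp h2
      exact (mem_counter_iff research n k (2 * n * k) y).mp h3
    have hWmem : ∀ y, y ∈ winsList research n k (2 * n * k) → y ∈ mA :: tA := by
      intro y hy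
      have h3 := (mem_counter_iff research n k (2 * n * k) y).mpr hy
      have h2 := (PySem.List.mem_sorted _ (fun p : String × Int => p.2) true y).mpr h3
      rw [hL1eq] at h2
      rcases List.mem_cons.mp h2 with rfl | h'
      · exact (hmemA y).mpr (Or.inr List.mem_cons_self)
      · exact (hmemA y).mpr (Or.inl h')
    have hminW : ∀ y ∈ winsList research n k (2 * n * k), ¬ pLT y mA := by
      intro y hy h
      have hf := hminA y (hWmem y hy)
      rw [(bfun_iff y mA).mpr h] at hf
      simp at hf
    have hmAW : mA ∈ winsList research n k (2 * n * k) := hmemW mA List.mem_cons_self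
    have hminWB : ∀ y ∈ winsList research n k (2 * n * k), ¬ pLT y mB := by
      intro y hy
      rw [hWeq] at hy
      rcases List.mem_cons.mp hy with rfl | hy'
      · exact hbm
      · exact hlm y hy'
    have hmBW : mB ∈ winsList research n k (2 * n * k) := by
      rw [hWeq]
      rcases hmB with rfl | h
      · exact List.mem_cons_self
      · exact List.mem_cons_of_mem _ h
    have hAB : mA = mB := pLT_connex (hminWB mA hmAW) (hminW mB hmBW)
    rw [hWeq, hbest, hAB]
  · rw [if_neg hbi]
    have hW : winsList research n k (2 * n * k) = [] := by
      by_contra h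
      exact hbi ((flatMap_ne_nil_iff research n k _).mpr h)
    rw [hW]
    rfl
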